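-- pv_equiv track=rewrite | github.com/oouxx/short_url_generate | utils/convert.py | dec_2_62
-- ===== SOURCE A (Python) =====
-- convert_table = ['0', '1', '2', '3', '4', '5', '6', '7', '8', '9',
--                  'a', 'b', 'c', 'd', 'e', 'f', 'g', 'h', 'i', 'j',
--                  'k', 'l', 'm', 'n', 'o', 'p', 'q', 'r', 's', 't',
--                  'u', 'v', 'w', 'x', 'y', 'z', 'A', 'B', 'C', 'D',
--                  'E', 'F', 'G', 'H', 'I', 'J', 'K', 'L', 'M', 'N',
--                  'O', 'P', 'Q', 'R', 'S', 'T', 'U', 'V', 'W', 'X', 'Y', 'Z']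
--
-- def dec_2_62(id):
--     id = int(id)
--     index_list = []
--     append = index_list.append
--     base = convert_table.__len__()
--
--     while id > 0:
--         remainder = id % 62
--         append(remainder - 1)
--         id = id // base
--     return index_list
-- ===== SOURCE B (Python) =====
-- def dec_2_62(id):
--     id = int(id)
--     if id <= 0:
--         return []
--     # largest exponent m with 62**m <= id
--     m = 0
--     p = 62
--     while p <= id:
--         m += 1
--         p *= 62
--     # digit at each power position, least-significant first, without mutating id
--     return [(id // 62 ** i) % 62 - 1 for i in range(m + 1)]
-- ===== Notes on version B (the rewrite author's own statement) =====
-- stated objective: alternative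
-- what changed: B first finds the highest power of 62 not exceeding id and then reads each digit directly as (id // 62**i) % 62 - 1 by position, instead of A's loop that repeatedly mutates id by floor division.
import Mathlib
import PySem

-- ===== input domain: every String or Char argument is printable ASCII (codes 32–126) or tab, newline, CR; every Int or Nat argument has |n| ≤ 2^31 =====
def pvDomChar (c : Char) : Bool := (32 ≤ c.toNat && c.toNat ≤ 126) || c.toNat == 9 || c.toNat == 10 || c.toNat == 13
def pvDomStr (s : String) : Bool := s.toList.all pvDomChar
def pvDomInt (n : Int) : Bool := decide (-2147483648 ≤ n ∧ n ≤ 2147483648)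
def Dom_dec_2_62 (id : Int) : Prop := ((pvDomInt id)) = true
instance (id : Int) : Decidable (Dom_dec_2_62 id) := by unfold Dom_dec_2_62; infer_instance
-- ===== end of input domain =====

-- B reads each base-62 digit directly by its power position (after locating the top power)
-- instead of A's loop that repeatedly mutates id by floor division; objective: alternative.

-- ===== PORT A =====
-- the while loop: while id > 0: append(id % 62 - 1); id = id // 62  (base = len(convert_table) = 62)
def dec_2_62_loop (id : Int) : List Int :=
  if h : id > 0 then
    (PySem.Int.mod id 62 - 1) :: dec_2_62_loop (PySem.Int.floordiv id 62)
  else []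
termination_by id.toNat
decreasing_by
  rw [PySem.Int.floordiv_eq_ediv_of_pos (by norm_num)]
  omega

def dec_2_62 (id : Int) : List Int :=
  -- id = int(id) is the identity on an int argument
  dec_2_62_loop id

-- ===== PORT B =====
-- the while loop: while p <= id: m += 1; p *= 62   (hp carries positivity of p for termination only)
def findExp (id p m : Int) (hp : 0 < p) : Int :=
  if h : p ≤ id then findExp id (p * 62) (m + 1) (by positivity) else m
termination_by (id + 1 - p).toNat
decreasing_by
  omega

-- 62 ** i : i runs over range(m+1) so i ≥ 0 and ^ i.toNat is exact
def dec_2_62_alt (id : Int) : List Int :=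
  if id ≤ 0 then []
  else
    (PySem.List.pyRange 0 (findExp id 62 0 (by norm_num) + 1) 1).map
      (fun i => PySem.Int.mod (PySem.Int.floordiv id (62 ^ i.toNat)) 62 - 1)

-- ===== PRECONDITION & SPEC =====
def Spec_dec_2_62 (id : Int) (out : List Int) : Prop := out = dec_2_62_alt id
instance (id : Int) (out : List Int) : Decidable (Spec_dec_2_62 id out) := by unfold Spec_dec_2_62; infer_instance

-- ===== CLAIM (what is proved, stated in full; the proofs are below) =====
def Claim_equal_dec_2_62 : Prop := ∀ (id : Int), Dom_dec_2_62 id → Spec_dec_2_62 id (dec_2_62 id)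

-- ===== LEMMAS AND PROOFS =====

lemma findExp_shift : ∀ (n : Nat) (id p m : Int) (hp : 0 < p) (hpp : 0 < p * 62),
    (id - p).toNat ≤ n →
    findExp id (p * 62) (m + 1) hpp = findExp (id / 62) p m hp + 1 := by
  intro n
  induction n with
  | zero =>
    intro id p m hp hpp hn
    have hc : ¬ (p * 62 ≤ id) := by omega
    have hc' : ¬ (p ≤ id / 62) := by
      rw [Int.le_ediv_iff_mul_le (by norm_num)]; exact hc
    rw [findExp]
    conv_rhs => rw [findExp]
    simp [hc, hc']
  | succ n ih =>
    intro id p m hp hpp hn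
    rw [findExp]
    conv_rhs => rw [findExp]
    by_cases hc : p * 62 ≤ id
    · have hc' : p ≤ id / 62 := by
        rw [Int.le_ediv_iff_mul_le (by norm_num)]; exact hc
      simp only [hc, hc', dif_pos]
      exact ih id (p * 62) (m + 1) hpp (by positivity) (by omega)
    · have hc' : ¬ (p ≤ id / 62) := by
        rw [Int.le_ediv_iff_mul_le (by norm_num)]; exact hc
      simp [hc, hc']

lemma findExp_ge : ∀ (n : Nat) (id p m : Int) (hp : 0 < p),
    (id + 1 - p).toNat ≤ n → m ≤ findExp id p m hp := by
  intro n
  induction n with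
  | zero =>
    intro id p m hp hn
    have hc : ¬ (p ≤ id) := by omega
    rw [findExp]
    simp [hc]
  | succ n ih =>
    intro id p m hp hn
    rw [findExp]
    by_cases hc : p ≤ id
    · simp only [hc, dif_pos]
      have := ih id (p * 62) (m + 1) (by positivity) (by omega)
      omega
    · simp [hc]

-- B also steps by one least-significant digit at a time
lemma alt_cons (id : Int) (h : 0 < id) :
    dec_2_62_alt id = (PySem.Int.mod id 62 - 1) :: dec_2_62_alt (PySem.Int.floordiv id 62) := by
  rw [PySem.Int.floordiv_eq_ediv_of_pos (by norm_num)]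
  by_cases h62 : 62 ≤ id
  · -- at least two digits
    have hq : 0 < id / 62 := by
      have : (1:Int) ≤ id / 62 := by rw [Int.le_ediv_iff_mul_le (by norm_num)]; omega
      omega
    unfold dec_2_62_alt
    simp only [if_neg (by omega : ¬ id ≤ 0), if_neg (by omega : ¬ id / 62 ≤ 0)]
    have hfe : findExp id 62 0 (by norm_num) =
        findExp (id / 62) 62 0 (by norm_num) + 1 := by
      rw [findExp]
      simp only [h62, dif_pos]
      exact findExp_shift (id - 62).toNat id 62 0 (by norm_num) (by norm_num) le_rfl
    have hmq0 : (0:Int) ≤ findExp (id / 62) 62 0 (by norm_num) :=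
      findExp_ge (id / 62 + 1 - 62).toNat (id / 62) 62 0 (by norm_num) le_rfl
    set mq := findExp (id / 62) 62 0 (by norm_num) with hmq
    rw [hfe]
    rw [PySem.List.pyRange_one_cons (by omega : (0:Int) < mq + 1 + 1)]
    rw [List.map_cons]
    have hhead : PySem.Int.mod (PySem.Int.floordiv id (62 ^ (0:Int).toNat)) 62 - 1
        = PySem.Int.mod id 62 - 1 := by
      norm_num [PySem.Int.floordiv_eq_ediv_of_pos (by norm_num : (0:Int) < 1)]
    rw [hhead]
    congr 1
    rw [PySem.List.pyRange_one, PySem.List.pyRange_one]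
    have hN : (mq + 1 + 1 - (0 + 1)).toNat = (mq + 1 - 0).toNat := by omega
    rw [hN, List.map_map, List.map_map]
    apply List.map_congr_left
    intro k _
    simp only [Function.comp]
    have h1 : ((0:Int) + 1 + (k:Int)).toNat = k + 1 := by omega
    have h0 : ((0:Int) + (k:Int)).toNat = k := by omega
    rw [h1, h0]
    rw [PySem.Int.floordiv_eq_ediv_of_pos (by positivity),
        PySem.Int.floordiv_eq_ediv_of_pos (by positivity)]
    rw [Int.ediv_ediv_of_nonneg (by norm_num)]
    norm_num [pow_succ, mul_comm]
  · -- single digit: 0 < id < 62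
    have hq0 : id / 62 = 0 := Int.ediv_eq_zero_of_lt (by omega) (by omega)
    unfold dec_2_62_alt
    simp only [if_neg (by omega : ¬ id ≤ 0), hq0, if_pos (le_refl (0:Int))]
    have hfe : findExp id 62 0 (by norm_num) = 0 := by
      rw [findExp]; simp [h62]
    rw [hfe, PySem.List.pyRange_one_singleton, List.map_cons, List.map_nil]
    have : PySem.Int.floordiv id (62 ^ (0:Int).toNat) = id := by
      norm_num [PySem.Int.floordiv_eq_ediv_of_pos (by norm_num : (0:Int) < 1)]
    rw [this]

lemma key : ∀ (n : Nat) (id : Int), id.toNat ≤ n → dec_2_62_loop id = dec_2_62_alt id := by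
  intro n
  induction n with
  | zero =>
    intro id hn
    have h0 : ¬ id > 0 := by omega
    have h1 : id ≤ 0 := by omega
    rw [dec_2_62_loop]
    simp [h0, dec_2_62_alt, h1]
  | succ n ih =>
    intro id hn
    rw [dec_2_62_loop]
    by_cases h : id > 0
    · rw [dif_pos h, alt_cons id h]
      congr 1
      apply ih
      rw [PySem.Int.floordiv_eq_ediv_of_pos (by norm_num)]
      omega
    · have h1 : id ≤ 0 := by omega
      simp [h, dec_2_62_alt, h1]

-- ===== VERDICT (by name: the statement is the Claim_ definition above) =====
theorem dec_2_62_spec : Claim_equal_dec_2_62 := by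
  intro id _
  exact key id.toNat id le_rfl
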